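-- pv_equiv track=rewrite | github.com/bbu654/FreeCell-RoughDraft | fc_game/myfcv0001.py | getCardLocation
-- ===== SOURCE A (Python) =====
-- def getCardLocation(tablow, minp, dinp):
--     mou=-1;moo=0;dou=-1;doo=0;moapt=mou,moo;doapt=dou,doo
--     for ii,qq in enumerate(tablow):# if minp in qq else 0]
--         if minp in qq:
--             mou=ii; moo=qq.index(minp);moapt=mou,moo
--         if dinp in qq:
--             dou=ii; doo=qq.index(dinp);doapt=dou,doo
--
--         #if dou > -1 and mou > -1:
--         #    tablow[doapt[0]+1][doapt[1]]=tablow[mou][moo]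
--         #    tablow[mou][moo]=BLANKCARD
--         #    break  # moapt,doapt
--     return tablow,moapt,doapt
-- ===== SOURCE B (Python) =====
-- def getCardLocation(tablow, minp, dinp):
--     moapt = (-1, 0)
--     doapt = (-1, 0)
--     found_m = False
--     found_d = False
--     for ii, row in reversed(list(enumerate(tablow))):
--         if not found_m and minp in row:
--             moapt = (ii, row.index(minp))
--             found_m = True
--         if not found_d and dinp in row:
--             doapt = (ii, row.index(dinp))
--             found_d = True
--         if found_m and found_d:
--             break
--     return tablow, moapt, doapt
-- ===== Notes on version B (the rewrite author's own statement) =====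
-- stated objective: alternative
-- what changed: Scans the rows bottom-up with found-flags and an early exit once both cards are located (the last occurrence is the first hit in reverse), instead of A's full top-down sweep that keeps overwriting the recorded points.
import Mathlib
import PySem

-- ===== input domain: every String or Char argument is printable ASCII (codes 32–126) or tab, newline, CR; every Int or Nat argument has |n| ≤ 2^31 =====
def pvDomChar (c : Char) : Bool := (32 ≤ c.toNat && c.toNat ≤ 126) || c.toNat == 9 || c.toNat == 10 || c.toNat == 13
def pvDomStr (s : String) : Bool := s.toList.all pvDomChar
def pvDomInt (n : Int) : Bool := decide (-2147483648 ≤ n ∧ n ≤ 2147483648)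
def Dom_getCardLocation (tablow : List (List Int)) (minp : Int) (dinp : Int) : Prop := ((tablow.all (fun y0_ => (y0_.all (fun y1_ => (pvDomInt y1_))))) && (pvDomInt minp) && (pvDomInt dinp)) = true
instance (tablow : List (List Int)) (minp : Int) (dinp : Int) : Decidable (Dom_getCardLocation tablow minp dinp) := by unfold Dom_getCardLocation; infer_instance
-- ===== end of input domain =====

-- B scans the rows bottom-up with found-flags and an early exit once both cards are located
-- (the last occurrence of a card is the first hit in reverse order); same return value as A.

-- qq.index(v): always guarded by 'v in qq' in both programs, so index? is some there (getD 0 never fires).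
def idxOf0 (v : Int) (row : List Int) : Int := ((PySem.List.index? row v).getD 0 : Int)

-- ===== PORT A =====
-- one step of A's loop body: update moapt then doapt
def aStep (minp dinp : Int) (st : (Int × Int) × (Int × Int)) (p : Int × List Int) : (Int × Int) × (Int × Int) :=
  let st1 := if minp ∈ p.2 then ((p.1, idxOf0 minp p.2), st.2) else st
  if dinp ∈ p.2 then (st1.1, (p.1, idxOf0 dinp p.2)) else st1

def getCardLocation (tablow : List (List Int)) (minp : Int) (dinp : Int) : List (List Int) × (Int × Int) × (Int × Int) :=
  let st := (PySem.List.enumerate tablow).foldl (aStep minp dinp) ((-1, 0), (-1, 0))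
  (tablow, st.1, st.2)

-- ===== PORT B =====
-- B's loop over reversed(list(enumerate(tablow))) with found-flags and early exit
def altLoop (minp dinp : Int) : List (Int × List Int) → (Bool × (Int × Int)) → (Bool × (Int × Int)) → (Int × Int) × (Int × Int)
  | [], m, d => (m.2, d.2)
  | (ii, row) :: rest, m, d =>
    let m' := if !m.1 && decide (minp ∈ row) then (true, (ii, idxOf0 minp row)) else m
    let d' := if !d.1 && decide (dinp ∈ row) then (true, (ii, idxOf0 dinp row)) else d
    if m'.1 && d'.1 then (m'.2, d'.2) else altLoop minp dinp rest m' d'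

def getCardLocation_alt (tablow : List (List Int)) (minp : Int) (dinp : Int) : List (List Int) × (Int × Int) × (Int × Int) :=
  (tablow, altLoop minp dinp (PySem.List.enumerate tablow).reverse (false, (-1, 0)) (false, (-1, 0)))

-- ===== PRECONDITION & SPEC =====
def Spec_getCardLocation (tablow : List (List Int)) (minp : Int) (dinp : Int) (out : List (List Int) × (Int × Int) × (Int × Int)) : Prop := out = getCardLocation_alt tablow minp dinp
instance (tablow : List (List Int)) (minp : Int) (dinp : Int) (out : List (List Int) × (Int × Int) × (Int × Int)) : Decidable (Spec_getCardLocation tablow minp dinp out) := by unfold Spec_getCardLocation; infer_instance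

-- ===== CLAIM (what is proved, stated in full; the proofs are below) =====
def Claim_equal_getCardLocation : Prop := ∀ (tablow : List (List Int)) (minp : Int) (dinp : Int), Dom_getCardLocation tablow minp dinp → Spec_getCardLocation tablow minp dinp (getCardLocation tablow minp dinp)

-- ===== LEMMAS AND PROOFS =====

-- first row (with its index) of l containing v, with its column; dflt if none
def hitD (v : Int) : List (Int × List Int) → (Int × Int) → (Int × Int)
  | [], dflt => dflt
  | (ii, row) :: rest, dflt => if v ∈ row then (ii, idxOf0 v row) else hitD v rest dflt

theorem hitD_append (v : Int) (a b : List (Int × List Int)) (d : Int × Int) :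
    hitD v (a ++ b) d = hitD v a (hitD v b d) := by
  induction a with
  | nil => rfl
  | cons x xs ih => cases x with | mk ii row => simp only [List.cons_append, hitD, ih]

theorem foldA_eq (minp dinp : Int) (l : List (Int × List Int)) (st : (Int × Int) × (Int × Int)) :
    l.foldl (aStep minp dinp) st = (hitD minp l.reverse st.1, hitD dinp l.reverse st.2) := by
  induction l generalizing st with
  | nil => rfl
  | cons x xs ih =>
    cases x with | mk ii row =>
    rw [List.foldl_cons, ih]
    simp only [List.reverse_cons, hitD_append]
    congr 1
    · by_cases hm : minp ∈ row <;> simp [aStep, hitD, hm] <;> split <;> rfl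
    · by_cases hd : dinp ∈ row <;> simp [aStep, hitD, hd] <;> split <;> rfl

theorem altLoop_eq (minp dinp : Int) (ys : List (Int × List Int)) (m d : Bool × (Int × Int)) :
    altLoop minp dinp ys m d =
      ((if m.1 then m.2 else hitD minp ys m.2), (if d.1 then d.2 else hitD dinp ys d.2)) := by
  induction ys generalizing m d with
  | nil => cases m with | mk mf mv => cases d with | mk df dv => cases mf <;> cases df <;> rfl
  | cons x xs ih =>
    cases x with | mk ii row =>
    cases m with | mk mf mv =>
    cases d with | mk df dv =>
    by_cases hm : minp ∈ row <;> by_cases hd : dinp ∈ row <;>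
      cases mf <;> cases df <;>
      simp [altLoop, hm, hd, ih, hitD]

theorem getCardLocation_eq_alt (tablow : List (List Int)) (minp dinp : Int) :
    getCardLocation tablow minp dinp = getCardLocation_alt tablow minp dinp := by
  unfold getCardLocation getCardLocation_alt
  rw [foldA_eq, altLoop_eq]
  rfl

-- ===== VERDICT (by name: the statement is the Claim_ definition above) =====
theorem getCardLocation_spec : Claim_equal_getCardLocation := by
  intro tablow minp dinp _
  unfold Spec_getCardLocation
  exact getCardLocation_eq_alt tablow minp dinp
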